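-- pv_equiv track=rewrite | github.com/rfshiroma/Data-Structures-and-Algorithms-Specialization | 04_Algorithms-on-Strings/Week4-Algorithmic /3-suffix_array_matching/suffix_array_matching_v1.py | compute_char_classes
-- ===== SOURCE A (Python) =====
-- def compute_char_classes(s, order):
--     char_class = [0] * len(s)
--     for i in range(1, len(s)):
--         if s[order[i]] == s[order[i-1]]:
--             char_class[order[i]] = char_class[order[i-1]]
--         else:
--             char_class[order[i]] = char_class[order[i-1]] + 1
--
--     return char_class
-- ===== SOURCE B (Python) =====
-- def compute_char_classes(s, order):
--     n = len(s)
--     deltas = [0 if s[order[k]] == s[order[k - 1]] else 1 for k in range(1, n)]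
--     prefix = []
--     running = 0
--     for d in deltas:
--         running += d
--         prefix.append(running)
--     char_class = [0] * n
--     for idx, c in zip(order[1:n], prefix):
--         char_class[idx] = c
--     return char_class
-- ===== Notes on version B (the rewrite author's own statement) =====
-- stated objective: alternative
-- what changed: A's fused loop that reads the running class back out of the array it is writing is split into three passes: a neighbour-difference (delta) list, an explicit prefix-sum list, and a scatter of the prefix sums into the output via zip.
import Mathlib
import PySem

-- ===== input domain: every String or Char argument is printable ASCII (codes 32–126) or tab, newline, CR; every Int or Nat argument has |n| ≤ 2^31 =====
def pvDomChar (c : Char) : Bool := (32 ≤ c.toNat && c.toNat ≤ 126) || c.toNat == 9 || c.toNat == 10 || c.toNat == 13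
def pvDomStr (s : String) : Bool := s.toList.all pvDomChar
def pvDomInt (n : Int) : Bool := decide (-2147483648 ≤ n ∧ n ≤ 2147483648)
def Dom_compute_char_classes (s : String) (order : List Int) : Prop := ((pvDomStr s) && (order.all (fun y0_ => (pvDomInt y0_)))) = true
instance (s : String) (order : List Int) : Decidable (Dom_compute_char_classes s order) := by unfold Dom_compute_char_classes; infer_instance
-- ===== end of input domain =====

-- B replaces A's fused loop (which reads the running class back out of the array it writes)
-- by three passes: a delta list, an explicit prefix-sum pass, and a zip-scatter (objective:
-- alternative decomposition, same O(n) cost).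

-- ===== PORT A =====
def compute_char_classes (s : String) (order : List Int) : List Int :=
  let cs := s.toList
  (PySem.List.pyRange 1 (cs.length : Int) 1).foldl
    (fun cc i =>
      if PySem.List.pyGetD cs (PySem.List.pyGetD order i 0) ' '
         = PySem.List.pyGetD cs (PySem.List.pyGetD order (i - 1) 0) ' ' then
        PySem.List.pySetD cc (PySem.List.pyGetD order i 0)
          (PySem.List.pyGetD cc (PySem.List.pyGetD order (i - 1) 0) 0)
      else
        PySem.List.pySetD cc (PySem.List.pyGetD order i 0)
          (PySem.List.pyGetD cc (PySem.List.pyGetD order (i - 1) 0) 0 + 1))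
    (List.replicate cs.length 0)

-- ===== PORT B =====
def compute_char_classes_alt (s : String) (order : List Int) : List Int :=
  let cs := s.toList
  let deltas : List Int :=
    (PySem.List.pyRange 1 (cs.length : Int) 1).map (fun k =>
      if PySem.List.pyGetD cs (PySem.List.pyGetD order k 0) ' '
         = PySem.List.pyGetD cs (PySem.List.pyGetD order (k - 1) 0) ' ' then 0 else 1)
  let pfx : List Int :=
    (deltas.foldl (fun (a : List Int × Int) d => (a.1 ++ [a.2 + d], a.2 + d)) ([], 0)).1
  ((PySem.List.slice order (some 1) (some (cs.length : Int))).zip pfx).foldl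
    (fun cc p => PySem.List.pySetD cc p.1 p.2)
    (List.replicate cs.length 0)

-- ===== PRECONDITION & SPEC =====
-- Pre_ = exactly the inputs where Python A returns (no IndexError): when len(s) ≥ 2 the loop
-- reads order[0..len(s)-1] and indexes s / char_class (both of length len(s)) with each of them.
def Pre_compute_char_classes (s : String) (order : List Int) : Prop :=
  2 ≤ s.toList.length →
    (s.toList.length ≤ order.length ∧
      ∀ o ∈ order.take s.toList.length, PySem.Raise.InRange s.toList.length o)
instance (s : String) (order : List Int) : Decidable (Pre_compute_char_classes s order) := by
  unfold Pre_compute_char_classes; infer_instance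

def pvWitness_compute_char_classes : String × List Int := ("aba", [0, 2, 1])

def Spec_compute_char_classes (s : String) (order : List Int) (out : List Int) : Prop := out = compute_char_classes_alt s order
instance (s : String) (order : List Int) (out : List Int) : Decidable (Spec_compute_char_classes s order out) := by unfold Spec_compute_char_classes; infer_instance

-- ===== CLAIM (what is proved, stated in full; the proofs are below) =====
def Claim_equal_compute_char_classes : Prop := ∀ (s : String) (order : List Int), Dom_compute_char_classes s order → Pre_compute_char_classes s order → Spec_compute_char_classes s order (compute_char_classes s order)

-- ===== LEMMAS AND PROOFS =====

-- the 0/1 value of "s[order[k]] != s[order[k-1]]" at step k, computed by both programs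
def pvDelta (cs : List Char) (order : List Int) (k : Int) : Int :=
  if PySem.List.pyGetD cs (PySem.List.pyGetD order k 0) ' '
     = PySem.List.pyGetD cs (PySem.List.pyGetD order (k - 1) 0) ' ' then 0 else 1

-- the running class value after m steps
def pvT (cs : List Char) (order : List Int) : Nat → Int
  | 0 => 0
  | m + 1 => pvT cs order m + pvDelta cs order ((m : Int) + 1)

-- A's loop step, written as a single write
def pvStepA (cs : List Char) (order : List Int) (cc : List Int) (i : Int) : List Int :=
  PySem.List.pySetD cc (PySem.List.pyGetD order i 0)
    (PySem.List.pyGetD cc (PySem.List.pyGetD order (i - 1) 0) 0 + pvDelta cs order i)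

lemma pvStepA_eq (cs : List Char) (order : List Int) :
    (fun cc i =>
      if PySem.List.pyGetD cs (PySem.List.pyGetD order i 0) ' '
         = PySem.List.pyGetD cs (PySem.List.pyGetD order (i - 1) 0) ' ' then
        PySem.List.pySetD cc (PySem.List.pyGetD order i 0)
          (PySem.List.pyGetD cc (PySem.List.pyGetD order (i - 1) 0) 0)
      else
        PySem.List.pySetD cc (PySem.List.pyGetD order i 0)
          (PySem.List.pyGetD cc (PySem.List.pyGetD order (i - 1) 0) 0 + 1))
    = pvStepA cs order := by
  funext cc i
  unfold pvStepA pvDelta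
  split_ifs <;> simp

lemma pvIdx?_some {n : Nat} {i : Int} (h : PySem.Raise.InRange n i) :
    ∃ k : Nat, PySem.List.pyIdx? n i = some k ∧ k < n := by
  obtain ⟨h1, h2⟩ := h
  unfold PySem.List.pyIdx?
  split_ifs with h3 h4 h5
  all_goals first
    | exact ⟨i.toNat, rfl, by omega⟩
    | exact ⟨n - (-i).toNat, rfl, by omega⟩
    | omega

lemma pvGetD_replicate (n : Nat) (i : Int) :
    PySem.List.pyGetD (List.replicate n (0 : Int)) i 0 = 0 := by
  unfold PySem.List.pyGetD PySem.List.pyGet?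
  cases h : PySem.List.pyIdx? (List.replicate n (0 : Int)).length i with
  | none => simp [h]
  | some k =>
    simp only [h, Option.bind_some]
    cases h2 : (List.replicate n (0 : Int))[k]? with
    | none => simp [h2]
    | some v =>
      have h3 := h2
      rw [List.getElem?_replicate] at h3
      split_ifs at h3 <;> simp_all

lemma pvGetD_pySetD_self (xs : List Int) (i : Int) (v : Int)
    (h : PySem.Raise.InRange xs.length i) :
    PySem.List.pyGetD (PySem.List.pySetD xs i v) i 0 = v := by
  obtain ⟨k, hk, hkn⟩ := pvIdx?_some h
  unfold PySem.List.pySetD PySem.List.pySet?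
  rw [hk]
  unfold PySem.List.pyGetD PySem.List.pyGet?
  simp only [Option.map_some, Option.getD_some, List.length_set]
  rw [hk]
  simp [List.getElem?_set_self, hkn]

lemma pvFoldScatter_length (f : List Int → α → List Int)
    (hf : ∀ cc x, (f cc x).length = cc.length) :
    ∀ (l : List α) (cc : List Int), (l.foldl f cc).length = cc.length := by
  intro l
  induction l with
  | nil => intro cc; rfl
  | cons x xs ih => intro cc; simp only [List.foldl_cons, ih, hf]

-- B's prefix-sum accumulator, characterised
def pvScan : List Int → Int → List Int
  | [], _ => []
  | d :: ds, c => (c + d) :: pvScan ds (c + d)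

lemma pvPfx_eq : ∀ (ds acc : List Int) (c : Int),
    (ds.foldl (fun (a : List Int × Int) d => (a.1 ++ [a.2 + d], a.2 + d)) (acc, c)).1
      = acc ++ pvScan ds c := by
  intro ds
  induction ds with
  | nil => intro acc c; simp [pvScan]
  | cons d ds ih =>
    intro acc c
    simp only [List.foldl_cons, pvScan, ih]
    simp

lemma pvScan_deltas (cs : List Char) (order : List Int) :
    ∀ (m k : Nat),
      pvScan ((PySem.List.pyRange ((k : Int) + 1) ((k : Int) + 1 + (m : Int)) 1).map
          (fun j => pvDelta cs order j)) (pvT cs order k)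
        = (List.range m).map (fun j => pvT cs order (k + 1 + j)) := by
  intro m
  induction m with
  | zero =>
    intro k
    rw [PySem.List.pyRange_one_eq_nil (by omega)]
    simp [pvScan]
  | succ m ih =>
    intro k
    rw [PySem.List.pyRange_one_cons (by push_cast; omega)]
    simp only [List.map_cons, pvScan]
    have h3 : pvT cs order k + pvDelta cs order ((k : Int) + 1) = pvT cs order (k + 1) := by
      simp [pvT]
    rw [h3]
    have h4 : (k : Int) + 1 + 1 = ((k + 1 : Nat) : Int) + 1 := by push_cast; ring
    have h5 : (k : Int) + 1 + ((m + 1 : Nat) : Int) = ((k + 1 : Nat) : Int) + 1 + (m : Int) := by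
      push_cast; ring
    rw [h4, h5, ih (k + 1)]
    rw [List.range_succ_eq_map, List.map_cons, List.map_map]
    have h6 : ((fun j => pvT cs order (k + 1 + j)) ∘ Nat.succ)
        = (fun j => pvT cs order (k + 1 + 1 + j)) := by
      funext j
      simp only [Function.comp_apply]
      congr 1
      omega
    rw [h6]

lemma pvZip_getElem? (l l' : List Int) (i : Nat) (a b : Int)
    (h : l[i]? = some a) (h' : l'[i]? = some b) : (l.zip l')[i]? = some (a, b) := by
  have hi : i < l.length := List.getElem?_eq_some_iff.mp h |>.choose
  have hi' : i < l'.length := List.getElem?_eq_some_iff.mp h' |>.choose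
  rw [List.getElem?_eq_getElem (by simp [List.length_zip]; omega)]
  simp [List.getElem_zip, List.getElem?_eq_getElem hi, List.getElem?_eq_getElem hi'] at *
  simp_all

-- the zipped scatter list of B, with the prefix sums written as pvT values
def pvZL (cs : List Char) (order : List Int) : List (Int × Int) :=
  (PySem.List.slice order (some 1) (some (cs.length : Int))).zip
    ((List.range (cs.length - 1)).map (fun j => pvT cs order (j + 1)))

lemma pvMain (cs : List Char) (order : List Int)
    (hn : 2 ≤ cs.length) (hlen : cs.length ≤ order.length)
    (hR : ∀ k : Nat, k < cs.length → PySem.Raise.InRange cs.length (order.getD k 0)) :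
    ∀ m : Nat, m ≤ cs.length - 1 →
      ((PySem.List.pyRange 1 (1 + (m : Int)) 1).foldl (pvStepA cs order)
          (List.replicate cs.length 0)
        = ((pvZL cs order).take m).foldl (fun cc p => PySem.List.pySetD cc p.1 p.2)
          (List.replicate cs.length 0))
      ∧ PySem.List.pyGetD
          ((PySem.List.pyRange 1 (1 + (m : Int)) 1).foldl (pvStepA cs order)
            (List.replicate cs.length 0))
          (PySem.List.pyGetD order (m : Int) 0) 0 = pvT cs order m := by
  intro m
  induction m with
  | zero =>
    intro _
    rw [PySem.List.pyRange_one_eq_nil (by omega)]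
    exact ⟨rfl, pvGetD_replicate _ _⟩
  | succ m ih =>
    intro hm
    obtain ⟨heq, hread⟩ := ih (by omega)
    have hm1 : m + 1 < cs.length := by omega
    -- peel the last step of A's range
    have hr : PySem.List.pyRange 1 (1 + ((m + 1 : Nat) : Int)) 1
        = PySem.List.pyRange 1 (1 + (m : Int)) 1 ++ [1 + (m : Int)] := by
      have : (1 : Int) + ((m + 1 : Nat) : Int) = (1 + (m : Int)) + 1 := by push_cast; ring
      rw [this, PySem.List.pyRange_one_succ_right (by omega)]
    -- the m-th element of B's zip list
    have hsl : PySem.List.slice order (some 1) (some (cs.length : Int))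
        = (order.drop 1).take (cs.length - 1) := by
      have := PySem.List.slice_natCast order 1 cs.length
      exact_mod_cast this
    have hs1 : (PySem.List.slice order (some 1) (some (cs.length : Int)))[m]?
        = some (order.getD (m + 1) 0) := by
      rw [hsl, List.getElem?_take_of_lt (by omega), List.getElem?_drop,
        show 1 + m = m + 1 from Nat.add_comm 1 m]
      rw [List.getElem?_eq_getElem (by omega), List.getD_eq_getElem _ _ (by omega)]
    have hs2 : ((List.range (cs.length - 1)).map (fun j => pvT cs order (j + 1)))[m]?
        = some (pvT cs order (m + 1)) := by
      simp [List.getElem?_map, List.getElem?_range, (by omega : m < cs.length - 1)]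
    have hz : (pvZL cs order)[m]? = some (order.getD (m + 1) 0, pvT cs order (m + 1)) :=
      pvZip_getElem? _ _ _ _ _ hs1 hs2
    have htake : (pvZL cs order).take (m + 1)
        = (pvZL cs order).take m ++ [(order.getD (m + 1) 0, pvT cs order (m + 1))] := by
      rw [List.take_add_one, hz]; rfl
    -- indices as getD values
    have hidx : PySem.List.pyGetD order (1 + (m : Int)) 0 = order.getD (m + 1) 0 := by
      have : (1 : Int) + (m : Int) = ((m + 1 : Nat) : Int) := by push_cast; ring
      rw [this, PySem.List.pyGetD_natCast]
    have hidx' : PySem.List.pyGetD order (((m + 1 : Nat) : Int)) 0 = order.getD (m + 1) 0 := by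
      rw [PySem.List.pyGetD_natCast]
    have hlenA : ((PySem.List.pyRange 1 (1 + (m : Int)) 1).foldl (pvStepA cs order)
        (List.replicate cs.length 0)).length = cs.length := by
      rw [pvFoldScatter_length (pvStepA cs order)
        (fun cc x => PySem.List.length_pySetD _ _ _)]
      exact List.length_replicate
    have hread' : PySem.List.pyGetD
        ((PySem.List.pyRange 1 (1 + (m : Int)) 1).foldl (pvStepA cs order)
          (List.replicate cs.length 0)) (order.getD m 0) 0 = pvT cs order m := by
      rw [← PySem.List.pyGetD_natCast (xs := order) (n := m)]
      exact hread
    have hstep0 : ∀ cc : List Int, pvStepA cs order cc (1 + (m : Int))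
        = PySem.List.pySetD cc (order.getD (m + 1) 0)
            (PySem.List.pyGetD cc (order.getD m 0) 0 + pvDelta cs order ((m : Int) + 1)) := by
      intro cc
      unfold pvStepA
      have h1 : (1 : Int) + (m : Int) - 1 = ((m : Nat) : Int) := by push_cast; ring
      rw [hidx, h1, PySem.List.pyGetD_natCast,
        show (1 : Int) + (m : Int) = (m : Int) + 1 from by ring]
    have hstep : pvStepA cs order
        ((PySem.List.pyRange 1 (1 + (m : Int)) 1).foldl (pvStepA cs order)
          (List.replicate cs.length 0)) (1 + (m : Int))
        = PySem.List.pySetD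
            ((PySem.List.pyRange 1 (1 + (m : Int)) 1).foldl (pvStepA cs order)
              (List.replicate cs.length 0))
            (order.getD (m + 1) 0) (pvT cs order (m + 1)) := by
      rw [hstep0, hread']
      rfl
    constructor
    · rw [hr, List.foldl_append, htake, List.foldl_append, ← heq]
      simp only [List.foldl_cons, List.foldl_nil]
      exact hstep
    · rw [hr, List.foldl_append]
      simp only [List.foldl_cons, List.foldl_nil]
      rw [hstep, hidx']
      exact pvGetD_pySetD_self _ _ _ (by rw [hlenA]; exact hR (m + 1) hm1)

-- ===== VERDICT (by name: the statement is the Claim_ definition above) =====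
theorem compute_char_classes_spec : Claim_equal_compute_char_classes := by
  intro s order _ hpre
  unfold Spec_compute_char_classes compute_char_classes compute_char_classes_alt
  simp only []
  by_cases hn : 2 ≤ s.toList.length
  · obtain ⟨hlen, hmem⟩ := hpre hn
    have hR : ∀ k : Nat, k < s.toList.length → PySem.Raise.InRange s.toList.length (order.getD k 0) := by
      intro k hk
      have hkl : k < order.length := by omega
      have : order.getD k 0 ∈ order.take s.toList.length := by
        rw [List.getD_eq_getElem _ _ hkl]
        have : order[k] = (order.take s.toList.length)[k]'(by simp only [List.length_take]; omega) :=
          (List.getElem_take).symm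
        rw [this]
        exact List.getElem_mem _
      exact hmem _ this
    have hdfn : (fun k => if PySem.List.pyGetD s.toList (PySem.List.pyGetD order k 0) ' '
         = PySem.List.pyGetD s.toList (PySem.List.pyGetD order (k - 1) 0) ' '
         then (0 : Int) else 1) = fun j => pvDelta s.toList order j := rfl
    have hbound : (1 : Int) + ((s.toList.length - 1 : Nat) : Int) = (s.toList.length : Int) := by
      push_cast [Nat.cast_sub (by omega : 1 ≤ s.toList.length)]; ring
    have hmain := (pvMain s.toList order hn hlen hR (s.toList.length - 1) le_rfl).1
    rw [hbound] at hmain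
    have hrange : PySem.List.pyRange 1 (s.toList.length : Int) 1
        = PySem.List.pyRange (((0 : Nat) : Int) + 1) (((0 : Nat) : Int) + 1 + ((s.toList.length - 1 : Nat) : Int)) 1 := by
      congr 1 <;> push_cast [Nat.cast_sub (by omega : 1 ≤ s.toList.length)] <;> ring
    have hpfx : ((((PySem.List.pyRange 1 (s.toList.length : Int) 1).map (fun j => pvDelta s.toList order j)).foldl
          (fun (a : List Int × Int) d => (a.1 ++ [a.2 + d], a.2 + d)) ([], 0)).1 : List Int)
        = (List.range (s.toList.length - 1)).map (fun j => pvT s.toList order (j + 1)) := by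
      rw [pvPfx_eq]
      have h0 : (0 : Int) = pvT s.toList order 0 := rfl
      rw [h0, hrange, pvScan_deltas s.toList order (s.toList.length - 1) 0]
      exact List.map_congr_left (fun a _ => by congr 1; omega)
    have htakeall : (pvZL s.toList order).take (s.toList.length - 1) = pvZL s.toList order := by
      apply List.take_of_length_le
      unfold pvZL
      simp [List.length_zip, PySem.List.length_slice]
    rw [pvStepA_eq, hmain, htakeall]
    unfold pvZL
    rw [hdfn, hpfx]
  · have hnil : PySem.List.pyRange 1 (s.toList.length : Int) 1 = [] :=
      PySem.List.pyRange_one_eq_nil (by omega)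
    rw [hnil]
    simp
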